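-- pv_equiv track=rewrite | github.com/rsoni8672/algorithms | leetcode/2038_remove_coloured_pieces.py | winner_of_game
-- ===== SOURCE A (Python) =====
-- def winner_of_game(colors: str) -> bool:
--     player = 0
--
--     a_index = 1
--     b_index = 1
--
--     last_played = None
--     while a_index < len(colors) - 1 or b_index < len(colors) - 1:
--         played = False
--         if player == 0:
--             player = 1
--             while not played and a_index < len(colors) - 1:
--                 if colors[a_index] == 'A' and colors[a_index - 1] == 'A' and colors[a_index + 1] == 'A':
--                     played = True
--                     a_index += 1
--                     last_played = 0
--                     break
--                 a_index += 1
--         else: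
--             player = 0
--             while not played and b_index < len(colors) - 1:
--                 if colors[b_index] == 'B' and colors[b_index - 1] == 'B' and colors[b_index + 1] == 'B':
--                     played = True
--                     b_index += 1
--                     last_played = 1
--                     break
--                 b_index += 1
--
--         if not played:
--             if player == 0:
--                 return True
--             else:
--                 return False
--     if last_played is None:
--         return False
--     else:
--         if last_played== 0:
--             return True
--         else:
--             return False
-- ===== SOURCE B (Python) =====
-- def winner_of_game(colors: str) -> bool:
--     # Single pass: count each player's total available moves (overlapping
--     # same-colour triples) and compare; no turn-by-turn simulation.
--     count_a = count_b = 0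
--     for i in range(1, len(colors) - 1):
--         if colors[i - 1] == colors[i] == colors[i + 1]:
--             if colors[i] == 'A':
--                 count_a += 1
--             elif colors[i] == 'B':
--                 count_b += 1
--     return count_a > count_b
-- ===== Notes on version B (the rewrite author's own statement) =====
-- stated objective: simpler
-- what changed: Replaces the two-pointer alternating-turn simulation with a single pass that counts each player's overlapping same-colour triples and returns countA > countB.
import Mathlib
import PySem

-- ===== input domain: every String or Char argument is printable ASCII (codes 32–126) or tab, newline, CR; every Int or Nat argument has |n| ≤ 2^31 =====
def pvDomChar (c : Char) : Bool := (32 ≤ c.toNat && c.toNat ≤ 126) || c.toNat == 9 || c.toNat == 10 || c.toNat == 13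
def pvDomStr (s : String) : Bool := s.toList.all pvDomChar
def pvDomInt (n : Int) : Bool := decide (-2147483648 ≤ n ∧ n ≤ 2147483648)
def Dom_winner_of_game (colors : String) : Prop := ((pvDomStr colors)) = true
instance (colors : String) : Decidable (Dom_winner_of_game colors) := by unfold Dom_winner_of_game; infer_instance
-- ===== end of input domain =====

-- B replaces A's two-pointer alternating-turn simulation by a single pass counting each
-- player's overlapping same-colour triples and comparing the counts (objective: simpler).


-- ===== PORT A =====
-- Inner `while` loop of A, one instance per player (the two Python loops are identical up
-- to the colour `c`): scan from index i for the next position whose neighbours and itself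
-- are all `c`; return the index just past it (the updated a_index/b_index), none if the
-- scan exhausts.  `fuel` is a structural totality guard only: every call passes
-- fuel ≥ cs.length - 1 - i, so the 0-branch is never the reason a scan stops.
-- Indices stay ≥ 1 and < len-1 under the guard, so `List.getD` is exact for Python's
-- colors[i-1]/colors[i]/colors[i+1].
def innerScan (cs : List Char) (c : Char) (i : Nat) : Nat → Option Nat
  | 0 => none
  | f + 1 =>
    if i < cs.length - 1 then
      if cs.getD i ' ' = c ∧ cs.getD (i - 1) ' ' = c ∧ cs.getD (i + 1) ' ' = c then
        some (i + 1)
      else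
        innerScan cs c (i + 1) f
    else
      none

-- A's final `if last_played is None / == 0` chain after the outer loop exits.
def finalResult (last : Option Nat) : Bool :=
  match last with
  | none => false
  | some lp => if lp = 0 then true else false

-- Outer `while` loop of A: state (player, a_index, b_index, last_played); `fuel` again a
-- structural totality guard (each iteration strictly advances a_index or b_index).
def loopA (cs : List Char) (player : Nat) (a b : Nat) (last : Option Nat) : Nat → Bool
  | 0 => false
  | f + 1 =>
    if a < cs.length - 1 ∨ b < cs.length - 1 then
      if player = 0 then
        match innerScan cs 'A' a cs.length with
        | some a2 => loopA cs 1 a2 b (some 0) f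
        | none => false        -- Alice could not play: player is now 1, return False
      else
        match innerScan cs 'B' b cs.length with
        | some b2 => loopA cs 0 a b2 (some 1) f
        | none => true         -- Bob could not play: player is now 0, return True
    else
      finalResult last

def winner_of_game (colors : String) : Bool :=
  loopA colors.toList 0 1 1 none (2 * colors.toList.length + 1)

-- ===== PORT B =====
-- Source B's single for-loop over range(1, len-1), accumulating (count_a, count_b);
-- `fuel` is the same structural totality guard (callers pass fuel ≥ cs.length - 1 - i).
def countLoop (cs : List Char) (i ca cb : Nat) : Nat → Nat × Nat
  | 0 => (ca, cb)
  | f + 1 =>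
    if i < cs.length - 1 then
      if cs.getD (i - 1) ' ' = cs.getD i ' ' ∧ cs.getD i ' ' = cs.getD (i + 1) ' ' then
        if cs.getD i ' ' = 'A' then countLoop cs (i + 1) (ca + 1) cb f
        else if cs.getD i ' ' = 'B' then countLoop cs (i + 1) ca (cb + 1) f
        else countLoop cs (i + 1) ca cb f
      else countLoop cs (i + 1) ca cb f
    else (ca, cb)

def winner_of_game_alt (colors : String) : Bool :=
  let p := countLoop colors.toList 1 0 0 colors.toList.length
  decide (p.2 < p.1)

-- ===== PRECONDITION & SPEC =====
def Spec_winner_of_game (colors : String) (out : Bool) : Prop := out = winner_of_game_alt colors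
instance (colors : String) (out : Bool) : Decidable (Spec_winner_of_game colors out) := by unfold Spec_winner_of_game; infer_instance

-- ===== CLAIM (what is proved, stated in full; the proofs are below) =====
def Claim_equal_winner_of_game : Prop := ∀ (colors : String), Dom_winner_of_game colors → Spec_winner_of_game colors (winner_of_game colors)

-- ===== LEMMAS AND PROOFS =====

-- Proof-side suffix counts: sfx cs i = (#A-triples at positions ≥ i, #B-triples at positions ≥ i).
def sfx (cs : List Char) (i : Nat) : Nat × Nat :=
  if i < cs.length - 1 then
    let rest := sfx cs (i + 1)
    if cs.getD (i - 1) ' ' = cs.getD i ' ' ∧ cs.getD i ' ' = cs.getD (i + 1) ' ' then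
      if cs.getD i ' ' = 'A' then (rest.1 + 1, rest.2)
      else if cs.getD i ' ' = 'B' then (rest.1, rest.2 + 1)
      else rest
    else rest
  else (0, 0)
termination_by cs.length - 1 - i

theorem sfx_stop (cs : List Char) (i : Nat) (h : ¬ i < cs.length - 1) : sfx cs i = (0, 0) := by
  rw [sfx, if_neg h]

theorem finalResult_of_ne (last : Option Nat) (h : last ≠ some 0) : finalResult last = false := by
  cases last with
  | none => rfl
  | some k => cases k with
    | zero => exact absurd rfl h
    | succ k => rfl

theorem countLoop_eq (cs : List Char) :
    ∀ (fuel i ca cb : Nat), cs.length - 1 - i ≤ fuel →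
      countLoop cs i ca cb fuel = (ca + (sfx cs i).1, cb + (sfx cs i).2) := by
  intro fuel
  induction fuel with
  | zero =>
    intro i ca cb hf
    have h1 : ¬ i < cs.length - 1 := by omega
    rw [countLoop, sfx_stop cs i h1]
    simp
  | succ f ih =>
    intro i ca cb hf
    rw [countLoop, sfx]
    by_cases h1 : i < cs.length - 1
    · rw [if_pos h1, if_pos h1]
      have hf2 : cs.length - 1 - (i + 1) ≤ f := by omega
      by_cases h2 : cs.getD (i - 1) ' ' = cs.getD i ' ' ∧ cs.getD i ' ' = cs.getD (i + 1) ' '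
      · rw [if_pos h2, if_pos h2]
        by_cases hA : cs.getD i ' ' = 'A'
        · rw [if_pos hA, if_pos hA, ih (i + 1) (ca + 1) cb hf2]
          simp; omega
        · rw [if_neg hA, if_neg hA]
          by_cases hB : cs.getD i ' ' = 'B'
          · rw [if_pos hB, if_pos hB, ih (i + 1) ca (cb + 1) hf2]
            simp; omega
          · rw [if_neg hB, if_neg hB, ih (i + 1) ca cb hf2]
      · rw [if_neg h2, if_neg h2, ih (i + 1) ca cb hf2]
    · rw [if_neg h1, if_neg h1]; simp

-- One unfolding step of sfx's first component, phrased with A's triple condition.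
theorem sfx_fst_step (cs : List Char) (i : Nat) (h1 : i < cs.length - 1) :
    (sfx cs i).1 =
      if cs.getD i ' ' = 'A' ∧ cs.getD (i - 1) ' ' = 'A' ∧ cs.getD (i + 1) ' ' = 'A' then
        (sfx cs (i + 1)).1 + 1
      else (sfx cs (i + 1)).1 := by
  rw [sfx, if_pos h1]
  split_ifs with hE hA hB hP hP hP hP <;> simp_all

theorem sfx_snd_step (cs : List Char) (i : Nat) (h1 : i < cs.length - 1) :
    (sfx cs i).2 =
      if cs.getD i ' ' = 'B' ∧ cs.getD (i - 1) ' ' = 'B' ∧ cs.getD (i + 1) ' ' = 'B' then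
        (sfx cs (i + 1)).2 + 1
      else (sfx cs (i + 1)).2 := by
  rw [sfx, if_pos h1]
  split_ifs with hE hA hB hP hP hP hP <;> simp_all

theorem innerScan_some_bounds (cs : List Char) (c : Char) :
    ∀ (fuel i j : Nat), innerScan cs c i fuel = some j → i < j ∧ j ≤ cs.length - 1 := by
  intro fuel
  induction fuel with
  | zero => intro i j h; rw [innerScan] at h; exact absurd h (by simp)
  | succ f ih =>
    intro i j h
    rw [innerScan] at h
    by_cases h1 : i < cs.length - 1
    · rw [if_pos h1] at h
      by_cases h2 : cs.getD i ' ' = c ∧ cs.getD (i - 1) ' ' = c ∧ cs.getD (i + 1) ' ' = c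
      · rw [if_pos h2] at h
        have : i + 1 = j := Option.some.inj h
        omega
      · rw [if_neg h2] at h
        have := ih (i + 1) j h
        omega
    · rw [if_neg h1] at h; exact absurd h (by simp)

theorem innerA_none (cs : List Char) :
    ∀ (fuel i : Nat), cs.length - 1 - i ≤ fuel → innerScan cs 'A' i fuel = none →
      (sfx cs i).1 = 0 := by
  intro fuel
  induction fuel with
  | zero =>
    intro i hf _
    have h1 : ¬ i < cs.length - 1 := by omega
    rw [sfx_stop cs i h1]
  | succ f ih =>
    intro i hf h
    rw [innerScan] at h
    by_cases h1 : i < cs.length - 1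
    · rw [if_pos h1] at h
      by_cases h2 : cs.getD i ' ' = 'A' ∧ cs.getD (i - 1) ' ' = 'A' ∧ cs.getD (i + 1) ' ' = 'A'
      · rw [if_pos h2] at h; exact absurd h (by simp)
      · rw [if_neg h2] at h
        rw [sfx_fst_step cs i h1, if_neg h2]
        exact ih (i + 1) (by omega) h
    · rw [sfx_stop cs i h1]

theorem innerA_some (cs : List Char) :
    ∀ (fuel i j : Nat), innerScan cs 'A' i fuel = some j →
      (sfx cs i).1 = (sfx cs j).1 + 1 := by
  intro fuel
  induction fuel with
  | zero => intro i j h; rw [innerScan] at h; exact absurd h (by simp)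
  | succ f ih =>
    intro i j h
    rw [innerScan] at h
    by_cases h1 : i < cs.length - 1
    · rw [if_pos h1] at h
      by_cases h2 : cs.getD i ' ' = 'A' ∧ cs.getD (i - 1) ' ' = 'A' ∧ cs.getD (i + 1) ' ' = 'A'
      · rw [if_pos h2] at h
        rw [sfx_fst_step cs i h1, if_pos h2, Option.some.inj h]
      · rw [if_neg h2] at h
        rw [sfx_fst_step cs i h1, if_neg h2]
        exact ih (i + 1) j h
    · rw [if_neg h1] at h; exact absurd h (by simp)

theorem innerB_none (cs : List Char) :
    ∀ (fuel i : Nat), cs.length - 1 - i ≤ fuel → innerScan cs 'B' i fuel = none →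
      (sfx cs i).2 = 0 := by
  intro fuel
  induction fuel with
  | zero =>
    intro i hf _
    have h1 : ¬ i < cs.length - 1 := by omega
    rw [sfx_stop cs i h1]
  | succ f ih =>
    intro i hf h
    rw [innerScan] at h
    by_cases h1 : i < cs.length - 1
    · rw [if_pos h1] at h
      by_cases h2 : cs.getD i ' ' = 'B' ∧ cs.getD (i - 1) ' ' = 'B' ∧ cs.getD (i + 1) ' ' = 'B'
      · rw [if_pos h2] at h; exact absurd h (by simp)
      · rw [if_neg h2] at h
        rw [sfx_snd_step cs i h1, if_neg h2]
        exact ih (i + 1) (by omega) h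
    · rw [sfx_stop cs i h1]

theorem innerB_some (cs : List Char) :
    ∀ (fuel i j : Nat), innerScan cs 'B' i fuel = some j →
      (sfx cs i).2 = (sfx cs j).2 + 1 := by
  intro fuel
  induction fuel with
  | zero => intro i j h; rw [innerScan] at h; exact absurd h (by simp)
  | succ f ih =>
    intro i j h
    rw [innerScan] at h
    by_cases h1 : i < cs.length - 1
    · rw [if_pos h1] at h
      by_cases h2 : cs.getD i ' ' = 'B' ∧ cs.getD (i - 1) ' ' = 'B' ∧ cs.getD (i + 1) ' ' = 'B'
      · rw [if_pos h2] at h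
        rw [sfx_snd_step cs i h1, if_pos h2, Option.some.inj h]
      · rw [if_neg h2] at h
        rw [sfx_snd_step cs i h1, if_neg h2]
        exact ih (i + 1) j h
    · rw [if_neg h1] at h; exact absurd h (by simp)

-- Invariant of A's outer loop: the mover wins iff it has strictly more remaining moves.
-- Reachable states pair player 0 with last ∈ {none, some 1} and player 1 with last = some 0.
theorem loop_main (cs : List Char) :
    ∀ fuel a b, cs.length - 1 - a + (cs.length - 1 - b) < fuel →
      ((∀ last, last ≠ some 0 →
          loopA cs 0 a b last fuel = decide ((sfx cs b).2 < (sfx cs a).1)) ∧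
       loopA cs 1 a b (some 0) fuel = decide ((sfx cs b).2 ≤ (sfx cs a).1)) := by
  intro fuel
  induction fuel with
  | zero => intro a b hm; omega
  | succ f ih =>
    intro a b hm
    constructor
    · intro last hlast
      rw [loopA]
      by_cases hg : a < cs.length - 1 ∨ b < cs.length - 1
      · rw [if_pos hg, if_pos rfl]
        split
        next a2 hs =>
          have hbd := innerScan_some_bounds cs 'A' cs.length a a2 hs
          have hm2 : cs.length - 1 - a2 + (cs.length - 1 - b) < f := by omega
          rw [(ih a2 b hm2).2, innerA_some cs cs.length a a2 hs]
          simp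
        next hs =>
          rw [innerA_none cs cs.length a (by omega) hs]
          simp
      · rw [if_neg hg]
        have ha : ¬ a < cs.length - 1 := by omega
        have hb : ¬ b < cs.length - 1 := by omega
        rw [sfx_stop cs a ha, sfx_stop cs b hb, finalResult_of_ne last hlast]
        rfl
    · rw [loopA]
      by_cases hg : a < cs.length - 1 ∨ b < cs.length - 1
      · rw [if_pos hg, if_neg (by omega : ¬ (1 : Nat) = 0)]
        split
        next b2 hs =>
          have hbd := innerScan_some_bounds cs 'B' cs.length b b2 hs
          have hm2 : cs.length - 1 - a + (cs.length - 1 - b2) < f := by omega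
          rw [(ih a b2 hm2).1 (some 1) (by simp), innerB_some cs cs.length b b2 hs]
          simp
        next hs =>
          rw [innerB_none cs cs.length b (by omega) hs]
          simp
      · rw [if_neg hg]
        have ha : ¬ a < cs.length - 1 := by omega
        have hb : ¬ b < cs.length - 1 := by omega
        rw [sfx_stop cs a ha, sfx_stop cs b hb]
        rfl

-- ===== VERDICT (by name: the statement is the Claim_ definition above) =====
theorem winner_of_game_spec : Claim_equal_winner_of_game := by
  intro colors _
  unfold Spec_winner_of_game winner_of_game winner_of_game_alt
  rw [countLoop_eq colors.toList colors.toList.length 1 0 0 (by omega)]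
  have := (loop_main colors.toList (2 * colors.toList.length + 1) 1 1 (by omega)).1 none (by simp)
  rw [this]
  simp
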